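-- pv_equiv track=rewrite | github.com/seungjun-green/X_Stock_Bot | brain.py | bold
-- ===== SOURCE A (Python) =====
-- def bold(input_text):
--     chars = "ABCDEFGHIJKLMNOPQRSTUVWXYZabcdefghijklmnopqrstuvwxyz0123456789"
--     bold_chars = "𝗔𝗕𝗖𝗗𝗘𝗙𝗚𝗛𝗜𝗝𝗞𝗟𝗠𝗡𝗢𝗣𝗤𝗥𝗦𝗧𝗨𝗩𝗪𝗫𝗬𝗭𝗮𝗯𝗰𝗱𝗲𝗳𝗴𝗵𝗶𝗷𝗸𝗹𝗺𝗻𝗼𝗽𝗾𝗿𝘀𝘁𝘂𝘃𝘄𝘅𝘆𝘇𝟬𝟭𝟮𝟯𝟰𝟱𝟲𝟳𝟴𝟵"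
--     output = ""
--     for character in input_text:
--         if character in chars:
--             output += bold_chars[chars.index(character)]
--         else:
--             output += character
--     return output
-- ===== SOURCE B (Python) =====
-- def bold(input_text):
--     out = []
--     for c in input_text:
--         if 'A' <= c <= 'Z':
--             out.append(chr(ord(c) - ord('A') + 0x1D5D4))
--         elif 'a' <= c <= 'z':
--             out.append(chr(ord(c) - ord('a') + 0x1D5EE))
--         elif '0' <= c <= '9':
--             out.append(chr(ord(c) - ord('0') + 0x1D7EC))
--         else:
--             out.append(c)
--     return ''.join(out)
-- ===== Notes on version B (the rewrite author's own statement) =====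
-- stated objective: idiomatic
-- what changed: B drops the two parallel lookup strings and the per-character membership test plus chars.index scan, computing each bold codepoint directly by arithmetic offset over three ASCII ranges.
import Mathlib
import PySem

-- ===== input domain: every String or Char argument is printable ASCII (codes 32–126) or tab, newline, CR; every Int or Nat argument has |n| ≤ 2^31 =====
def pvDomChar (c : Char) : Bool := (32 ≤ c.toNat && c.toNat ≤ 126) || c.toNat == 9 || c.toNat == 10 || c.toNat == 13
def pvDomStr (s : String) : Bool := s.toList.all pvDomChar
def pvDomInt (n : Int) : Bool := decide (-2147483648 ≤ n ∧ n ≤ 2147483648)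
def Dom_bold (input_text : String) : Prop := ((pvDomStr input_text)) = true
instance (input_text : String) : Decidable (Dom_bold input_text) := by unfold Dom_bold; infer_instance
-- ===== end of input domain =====

set_option maxRecDepth 4096


-- B replaces A's parallel lookup strings (membership test + .index scan per character) by
-- direct codepoint arithmetic on three ASCII ranges (objective: idiomatic/simpler; same return value).

-- ===== PORT A =====
def pvCharsA : List Char := "ABCDEFGHIJKLMNOPQRSTUVWXYZabcdefghijklmnopqrstuvwxyz0123456789".toList
def pvBoldA : List Char := "𝗔𝗕𝗖𝗗𝗘𝗙𝗚𝗛𝗜𝗝𝗞𝗟𝗠𝗡𝗢𝗣𝗤𝗥𝗦𝗧𝗨𝗩𝗪𝗫𝗬𝗭𝗮𝗯𝗰𝗱𝗲𝗳𝗴𝗵𝗶𝗷𝗸𝗹𝗺𝗻𝗼𝗽𝗾𝗿𝘀𝘁𝘂𝘃𝘄𝘅𝘆𝘇𝟬𝟭𝟮𝟯𝟰𝟱𝟲𝟳𝟴𝟵".toList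

/-- one iteration of A's loop: membership test, then `chars.index`, then indexing `bold_chars` -/
def pvStepA (output : String) (character : Char) : String :=
  if character ∈ pvCharsA then
    match PySem.List.index? pvCharsA character with
    | some i =>
      match PySem.List.pyGet? pvBoldA (Int.ofNat i) with
      | some b => output.push b
      | none => output          -- unreachable: index into the parallel table of equal length
    | none => output            -- unreachable: guarded by the membership test
  else output.push character

def bold (input_text : String) : String :=
  input_text.toList.foldl pvStepA ""

-- ===== PORT B =====
/-- B's per-character translation: arithmetic offset into the three bold blocks -/
def pvBoldChar (c : Char) : Char :=
  if 'A' ≤ c ∧ c ≤ 'Z' then Char.ofNat (c.toNat - 'A'.toNat + 0x1D5D4)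
  else if 'a' ≤ c ∧ c ≤ 'z' then Char.ofNat (c.toNat - 'a'.toNat + 0x1D5EE)
  else if '0' ≤ c ∧ c ≤ '9' then Char.ofNat (c.toNat - '0'.toNat + 0x1D7EC)
  else c

def bold_alt (input_text : String) : String :=
  String.ofList (input_text.toList.map pvBoldChar)

-- ===== PRECONDITION & SPEC =====
def Spec_bold (input_text : String) (out : String) : Prop := out = bold_alt input_text
instance (input_text : String) (out : String) : Decidable (Spec_bold input_text out) := by unfold Spec_bold; infer_instance

-- ===== CLAIM (what is proved, stated in full; the proofs are below) =====
def Claim_equal_bold : Prop := ∀ (input_text : String), Dom_bold input_text → Spec_bold input_text (bold input_text)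

-- ===== LEMMAS AND PROOFS =====

/-- on each character of A's table, the `.index` + lookup pipeline returns exactly B's bold char -/
lemma pvTable_ok :
    pvCharsA.all (fun c =>
      (PySem.List.index? pvCharsA c).bind (fun i => PySem.List.pyGet? pvBoldA (Int.ofNat i))
        = some (pvBoldChar c)) = true := by decide

/-- printable-ASCII characters outside A's table are fixed by B's translation -/
lemma pvOutside_ok :
    ∀ n ∈ List.range 127, Char.ofNat n ∉ pvCharsA → pvBoldChar (Char.ofNat n) = Char.ofNat n := by
  decide

lemma pvStepA_eq (c : Char) (hc : pvDomChar c = true) (out : String) :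
    pvStepA out c = out.push (pvBoldChar c) := by
  by_cases hmem : c ∈ pvCharsA
  · have h := List.all_eq_true.mp pvTable_ok c hmem
    simp only at h
    unfold pvStepA
    rw [if_pos hmem]
    cases hidx : PySem.List.index? pvCharsA c with
    | none => rw [hidx] at h; simp at h
    | some i =>
      rw [hidx] at h
      simp only [Option.bind_some] at h
      simp only [of_decide_eq_true h]
  · have hn : c.toNat ∈ List.range 127 := by
      simp only [pvDomChar, Bool.or_eq_true, Bool.and_eq_true, decide_eq_true_eq,
        beq_iff_eq] at hc
      simp only [List.mem_range]
      omega
    have hfix : pvBoldChar c = c := by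
      have h2 := pvOutside_ok c.toNat hn
      rw [Char.ofNat_toNat] at h2
      exact h2 hmem
    unfold pvStepA
    rw [if_neg hmem, hfix]

lemma pvFoldA_eq (l : List Char) (hl : l.all pvDomChar = true) (out : String) :
    l.foldl pvStepA out = String.ofList (out.toList ++ l.map pvBoldChar) := by
  induction l generalizing out with
  | nil => simp
  | cons c t ih =>
    simp only [List.all_cons, Bool.and_eq_true] at hl
    simp only [List.foldl_cons, List.map_cons]
    rw [pvStepA_eq c hl.1, ih hl.2]
    simp

-- ===== VERDICT (by name: the statement is the Claim_ definition above) =====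
theorem bold_spec : Claim_equal_bold := by
  intro s hdom
  unfold Spec_bold bold bold_alt
  rw [pvFoldA_eq s.toList hdom ""]
  simp
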